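-- pv_equiv track=rewrite | github.com/hitachi-nlp/FLD-generator | aacorpus/formal_logic/formal_language.py | _generate_replacements
-- ===== SOURCE A (Python) =====
-- from typing import Dict, List, Container, Optional, Any, Iterable, Set
--
-- def _generate_replacements(src_objs: List[Any],
--                            tgt_objs: List[Any]) -> Iterable[Dict[Any, Any]]:
--     if len(set(src_objs)) != len(src_objs):
--         raise ValueError()
--     if len(set(tgt_objs)) != len(tgt_objs):
--         raise ValueError()
--     for chosen_tgt_objs in permutations_with_replacement(tgt_objs, len(src_objs)):
--         yield {
--             src_obj: tgt_obj
--             for src_obj, tgt_obj in zip(src_objs, chosen_tgt_objs)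
--         }
--
-- def permutations_with_replacement(objs: List[Any], length: int) -> Iterable[List[Any]]:
--     if length < 1:
--         raise ValueError()
--
--     if length == 1:
--         for obj in objs:
--             yield [obj]
--     else:
--         for i_head in range(len(objs)):
--             for tail in permutations_with_replacement(objs, length - 1):
--                 yield [objs[i_head]] + tail
-- ===== SOURCE B (Python) =====
-- def _generate_replacements(src_objs, tgt_objs):
--     if len(set(src_objs)) != len(src_objs):
--         raise ValueError()
--     if len(set(tgt_objs)) != len(tgt_objs):
--         raise ValueError()
--     combos = [()]
--     for _ in src_objs:
--         combos = [prefix + (t,) for prefix in combos for t in tgt_objs]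
--     for combo in combos:
--         yield dict(zip(src_objs, combo))
-- ===== Notes on version B (the rewrite author's own statement) =====
-- stated objective: simpler
-- what changed: Replaces the recursive permutations_with_replacement helper (which rebuilds the whole tail product at every head index) with a single iterative left-to-right Cartesian-product accumulator, one list-comprehension step per source object.
import Mathlib
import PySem

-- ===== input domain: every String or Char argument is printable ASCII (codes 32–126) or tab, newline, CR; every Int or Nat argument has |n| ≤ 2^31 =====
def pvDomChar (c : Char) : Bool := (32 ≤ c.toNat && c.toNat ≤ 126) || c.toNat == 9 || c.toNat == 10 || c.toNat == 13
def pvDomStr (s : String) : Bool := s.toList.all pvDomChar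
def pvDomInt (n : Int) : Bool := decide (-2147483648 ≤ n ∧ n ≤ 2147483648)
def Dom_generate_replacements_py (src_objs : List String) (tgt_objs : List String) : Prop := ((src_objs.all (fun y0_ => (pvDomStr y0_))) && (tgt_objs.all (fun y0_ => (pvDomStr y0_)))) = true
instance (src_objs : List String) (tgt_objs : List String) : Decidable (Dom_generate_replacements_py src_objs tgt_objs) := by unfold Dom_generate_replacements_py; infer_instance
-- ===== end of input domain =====

-- B replaces A's recursive permutations_with_replacement helper by a single iterative
-- left-to-right Cartesian-product accumulator (objective: simpler). Same return values on Pre_.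

-- ===== PORT A =====
-- {src: tgt for src, tgt in zip(...)} : dict built from the zipped pairs, as its items list
def pyDictItems (ps : List (String × String)) : List (String × String) :=
  (PySem.Dict.ofList ps).items

-- permutations_with_replacement(objs, length); length < 1 raises ValueError (excluded by Pre_),
-- the port returns [] there (never reached inside Pre_).
def pwr (objs : List String) : Nat → List (List String)
  | 0 => []
  | 1 => objs.map (fun o => [o])
  | (n+2) =>
      (PySem.List.pyRange 0 (objs.length : Int) 1).flatMap
        (fun i_head => (pwr objs (n+1)).map
          (fun tail => PySem.List.pyGetD objs i_head "" :: tail))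

def generate_replacements_py (src_objs : List String) (tgt_objs : List String) : List (List (String × String)) :=
  -- the two duplicate-key checks raise ValueError (excluded by Pre_); the port returns [] there
  if (PySem.Set.ofList src_objs).length ≠ src_objs.length then []
  else if (PySem.Set.ofList tgt_objs).length ≠ tgt_objs.length then []
  else (pwr tgt_objs src_objs.length).map
    (fun chosen_tgt_objs => pyDictItems (src_objs.zip chosen_tgt_objs))

-- ===== PORT B =====
def generate_replacements_py_alt (src_objs : List String) (tgt_objs : List String) : List (List (String × String)) :=
  if (PySem.Set.ofList src_objs).length ≠ src_objs.length then []
  else if (PySem.Set.ofList tgt_objs).length ≠ tgt_objs.length then []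
  else
    -- combos = [()]; for _ in src_objs: combos = [pfx + (t,) for pfx in combos for t in tgt_objs]
    (src_objs.foldl
      (fun combos _ => combos.flatMap (fun pfx => tgt_objs.map (fun t => pfx ++ [t])))
      [[]]).map
      (fun combo => pyDictItems (src_objs.zip combo))

-- ===== PRECONDITION & SPEC =====
-- Pre_ excludes exactly the inputs on which A raises ValueError: duplicate src or tgt objects,
-- or an empty src list (permutations_with_replacement raises on length < 1).
def Pre_generate_replacements_py (src_objs : List String) (tgt_objs : List String) : Prop :=
  src_objs.Nodup ∧ tgt_objs.Nodup ∧ src_objs ≠ []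
instance (src_objs : List String) (tgt_objs : List String) : Decidable (Pre_generate_replacements_py src_objs tgt_objs) := by unfold Pre_generate_replacements_py; infer_instance

def pvWitness_generate_replacements_py : List String × List String := (["x", "y"], ["a", "b"])

def Spec_generate_replacements_py (src_objs : List String) (tgt_objs : List String) (out : List (List (String × String))) : Prop := out = generate_replacements_py_alt src_objs tgt_objs
instance (src_objs : List String) (tgt_objs : List String) (out : List (List (String × String))) : Decidable (Spec_generate_replacements_py src_objs tgt_objs out) := by unfold Spec_generate_replacements_py; infer_instance

-- ===== CLAIM (what is proved, stated in full; the proofs are below) =====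
def Claim_equal_generate_replacements_py : Prop := ∀ (src_objs : List String) (tgt_objs : List String), Dom_generate_replacements_py src_objs tgt_objs → Pre_generate_replacements_py src_objs tgt_objs → Spec_generate_replacements_py src_objs tgt_objs (generate_replacements_py src_objs tgt_objs)

-- ===== LEMMAS AND PROOFS =====

-- canonical lexicographic product: all length-n tuples over tgt, first coordinate slowest
def lexProd (tgt : List String) : Nat → List (List String)
  | 0 => [[]]
  | (n+1) => tgt.flatMap (fun t => (lexProd tgt n).map (fun c => t :: c))

-- one accumulator step of B's loop
def bStep (tgt : List String) (combos : List (List String)) : List (List String) :=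
  combos.flatMap (fun pfx => tgt.map (fun t => pfx ++ [t]))

lemma pwr_eq_lexProd (tgt : List String) : ∀ n : Nat, pwr tgt (n+1) = lexProd tgt (n+1) := by
  intro n
  induction n with
  | zero =>
      show tgt.map (fun o => [o]) = lexProd tgt 1
      simp only [lexProd]
      exact List.map_eq_flatMap
  | succ m ih =>
      show pwr tgt (m+2) = lexProd tgt (m+2)
      have hrange :
          (PySem.List.pyRange 0 (tgt.length : Int) 1).map
            (fun i => PySem.List.pyGetD tgt i "") = tgt :=
        PySem.List.map_pyGetD_pyRange_zero' tgt ""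
      calc (PySem.List.pyRange 0 (tgt.length : Int) 1).flatMap
            (fun i_head => (pwr tgt (m+1)).map
              (fun tail => PySem.List.pyGetD tgt i_head "" :: tail))
          = (((PySem.List.pyRange 0 (tgt.length : Int) 1).map
              (fun i => PySem.List.pyGetD tgt i "")).flatMap
              (fun t => (pwr tgt (m+1)).map (fun tail => t :: tail))) := by
            rw [List.flatMap_map]
        _ = tgt.flatMap (fun t => (lexProd tgt (m+1)).map (fun tail => t :: tail)) := by
            rw [hrange, ih]
        _ = lexProd tgt (m+2) := rfl

lemma bStep_lexProd (tgt : List String) : ∀ n : Nat, bStep tgt (lexProd tgt n) = lexProd tgt (n+1) := by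
  intro n
  induction n with
  | zero =>
      show bStep tgt [[]] = lexProd tgt 1
      simp only [bStep, lexProd]
      simp [List.map_eq_flatMap]
  | succ m ih =>
      show bStep tgt (lexProd tgt (m+1)) = lexProd tgt (m+2)
      calc bStep tgt (tgt.flatMap (fun t => (lexProd tgt m).map (fun c => t :: c)))
          = tgt.flatMap (fun t => bStep tgt ((lexProd tgt m).map (fun c => t :: c))) := by
            simp [bStep, List.flatMap_assoc]
        _ = tgt.flatMap (fun t => (bStep tgt (lexProd tgt m)).map (fun c => t :: c)) := by
            have hcomm : ∀ t : String,
                bStep tgt ((lexProd tgt m).map (fun c => t :: c))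
                  = (bStep tgt (lexProd tgt m)).map (fun c => t :: c) := by
              intro t
              simp [bStep, List.flatMap_map, List.map_flatMap, Function.comp_def]
            simp only [hcomm]
        _ = tgt.flatMap (fun t => (lexProd tgt (m+1)).map (fun c => t :: c)) := by rw [ih]
        _ = lexProd tgt (m+2) := rfl

lemma foldl_bStep (tgt : List String) :
    ∀ (src : List String) (n : Nat),
      src.foldl (fun combos _ => bStep tgt combos) (lexProd tgt n) = lexProd tgt (n + src.length) := by
  intro src
  induction src with
  | nil => intro n; simp
  | cons x xs ih =>
      intro n
      show xs.foldl (fun combos _ => bStep tgt combos) (bStep tgt (lexProd tgt n)) = _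
      rw [bStep_lexProd, ih]
      congr 1
      simp [List.length_cons]
      omega

lemma guards_pass (xs : List String) (h : xs.Nodup) :
    ¬ (PySem.Set.ofList xs).length ≠ xs.length := by
  rw [PySem.Set.ofList_eq_self_of_nodup xs h]
  simp

theorem generate_replacements_py_spec : Claim_equal_generate_replacements_py := by
  intro src tgt _ hpre
  obtain ⟨hsrc, htgt, hne⟩ := hpre
  unfold Spec_generate_replacements_py generate_replacements_py generate_replacements_py_alt
  rw [if_neg (guards_pass src hsrc), if_neg (guards_pass tgt htgt),
      if_neg (guards_pass src hsrc), if_neg (guards_pass tgt htgt)]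
  obtain ⟨y, ys, rfl⟩ := List.exists_cons_of_ne_nil hne
  have hfold := foldl_bStep tgt (y :: ys) 0
  simp only [Nat.zero_add] at hfold
  have : ((y :: ys).foldl
      (fun combos _ => combos.flatMap (fun pfx => tgt.map (fun t => pfx ++ [t]))) [[]])
      = lexProd tgt (y :: ys).length := by
    have : lexProd tgt 0 = [[]] := rfl
    rw [← this]
    exact hfold
  rw [this, List.length_cons, pwr_eq_lexProd tgt ys.length]
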